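-- pv_equiv track=rewrite | github.com/GregNemeth/vowel_swapper | stretch-goals/vowel_swapper_stretch_goal.py | vowel_swapper
-- ===== SOURCE A (Python) =====
-- def vowel_swapper(string):
--     # ==============
--     # Your code here
--     new_string = []
--     counter = {'a':0, 'e':0, 'i':0, 'o':0, 'u':0}
--     for i in range(len(string)):
--         if string[i] == 'a':
--             if counter['a'] == 0:
--                 new_string.append('a')
--                 counter['a'] += 1
--             elif counter['a'] == 1:
--                 new_string.append('4')
--                 counter['a'] += 1
--             else:
--                 new_string.append('a')
--                 counter['a'] += 1
--         elif string[i] == 'A':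
--             if counter['a'] != 1:
--                 new_string.append('A')
--                 counter['a'] += 1
--             elif counter['a'] == 1:
--                 new_string.append('4')
--                 counter['a'] += 1
--         elif string[i] == 'e':
--             if counter['e'] == 0:
--                 new_string.append('e')
--                 counter['e'] += 1
--             elif counter['e'] == 1:
--                 new_string.append('3')
--                 counter['e'] += 1
--             else:
--                 new_string.append('e')
--                 counter['e'] += 1
--         elif string[i] == 'E':
--             if counter['e'] != 1:
--                 new_string.append('E')
--                 counter['e'] += 1
--             elif counter['e'] == 1:
--                 new_string.append('3')
--                 counter['e'] += 1
--         elif string[i] == 'i':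
--             if counter['i'] == 0:
--                 new_string.append('i')
--                 counter['i'] += 1
--             elif counter['i'] == 1:
--                 new_string.append('!')
--                 counter['i'] += 1
--             else:
--                 new_string.append('i')
--                 counter['i'] += 1
--         elif string[i] == 'I':
--             if counter['i'] != 1:
--                 new_string.append('I')
--                 counter['i'] += 1
--             elif counter['i'] == 1:
--                 new_string.append('!')
--                 counter['i'] += 1
--         elif string[i] == 'o':
--             if counter['o'] == 0:
--                 new_string.append('o')
--                 counter['o'] += 1
--             elif counter['o'] == 1:
--                 new_string.append('ooo')
--                 counter['o'] += 1
--             else: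
--                 new_string.append('o')
--                 counter['o'] += 1
--         elif string[i] == 'O':
--             if counter['o'] != 1:
--                 new_string.append('O')
--                 counter['o'] += 1
--             elif counter['o'] == 1:
--                 new_string.append('000')
--                 counter['o'] += 1
--         elif string[i] == 'u':
--             if counter['u'] == 0:
--                 new_string.append('u')
--                 counter['u'] += 1
--             elif counter['u'] == 1:
--                 new_string.append('|_|')
--                 counter['u'] += 1
--             else:
--                 new_string.append('u')
--                 counter['u'] += 1
--         elif string[i] == 'U':
--             if counter['u'] != 1:
--                 new_string.append('U')
--                 counter['u'] += 1
--             elif counter['u'] == 1: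
--                 new_string.append('|_|')
--                 counter['u'] += 1
--         else:
--             new_string.append(string[i])
--
--     return ('"' + ''.join(new_string) + '"')
-- ===== SOURCE B (Python) =====
-- def vowel_swapper(string):
--     CANON = {'a': 'a', 'A': 'a', 'e': 'e', 'E': 'e', 'i': 'i', 'I': 'i',
--              'o': 'o', 'O': 'o', 'u': 'u', 'U': 'u'}
--     LEET = {'a': '4', 'A': '4', 'e': '3', 'E': '3', 'i': '!', 'I': '!',
--             'o': 'ooo', 'O': '000', 'u': '|_|', 'U': '|_|'}
--     counts = {}
--     repl = {}
--     for i, ch in enumerate(string):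
--         k = CANON.get(ch)
--         if k is not None:
--             counts[k] = counts.get(k, 0) + 1
--             if counts[k] == 2:
--                 repl[i] = LEET[ch]
--     return '"' + ''.join(repl.get(i, ch) for i, ch in enumerate(string)) + '"'
-- ===== Notes on version B (the rewrite author's own statement) =====
-- stated objective: alternative
-- what changed: A's single scan through an 11-branch elif chain is replaced by a table-driven two-pass design: pass 1 counts vowels case-insensitively via a canonicalisation dict and records each vowel's second occurrence in a position-to-leet map; pass 2 renders the output from that map.
import Mathlib
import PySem

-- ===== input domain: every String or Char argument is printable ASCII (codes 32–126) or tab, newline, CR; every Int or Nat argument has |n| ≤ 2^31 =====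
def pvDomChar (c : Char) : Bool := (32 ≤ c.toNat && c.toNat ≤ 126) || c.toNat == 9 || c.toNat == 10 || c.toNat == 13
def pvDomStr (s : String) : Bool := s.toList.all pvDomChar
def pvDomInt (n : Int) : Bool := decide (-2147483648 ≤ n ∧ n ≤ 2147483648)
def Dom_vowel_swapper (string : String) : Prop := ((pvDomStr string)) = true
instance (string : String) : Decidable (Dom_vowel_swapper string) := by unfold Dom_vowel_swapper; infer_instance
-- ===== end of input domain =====

-- B replaces A's single scan with its 11-way elif chain by a two-pass table-driven
-- decomposition: pass 1 counts vowels case-insensitively and records, in a position→leet map,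
-- the index of each vowel's second occurrence; pass 2 renders the string from that map.
-- Objective: alternative (same O(n) cost, different decomposition).

-- ===== PORT A =====
-- the body of A's for-loop (the elif chain), state = (counter, new_string);
-- counter['x'] is ported as getD (the five keys are always present, so Python never raises)
def stepA (c : Char) (st : PySem.Dict String Int × List String) : PySem.Dict String Int × List String :=
  let counter := st.1
  let new_string := st.2
  if c = 'a' then
    if counter.getD "a" 0 = 0 then (counter.insert "a" (counter.getD "a" 0 + 1), new_string ++ ["a"])
    else if counter.getD "a" 0 = 1 then (counter.insert "a" (counter.getD "a" 0 + 1), new_string ++ ["4"])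
    else (counter.insert "a" (counter.getD "a" 0 + 1), new_string ++ ["a"])
  else if c = 'A' then
    if counter.getD "a" 0 ≠ 1 then (counter.insert "a" (counter.getD "a" 0 + 1), new_string ++ ["A"])
    else if counter.getD "a" 0 = 1 then (counter.insert "a" (counter.getD "a" 0 + 1), new_string ++ ["4"])
    else st
  else if c = 'e' then
    if counter.getD "e" 0 = 0 then (counter.insert "e" (counter.getD "e" 0 + 1), new_string ++ ["e"])
    else if counter.getD "e" 0 = 1 then (counter.insert "e" (counter.getD "e" 0 + 1), new_string ++ ["3"])
    else (counter.insert "e" (counter.getD "e" 0 + 1), new_string ++ ["e"])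
  else if c = 'E' then
    if counter.getD "e" 0 ≠ 1 then (counter.insert "e" (counter.getD "e" 0 + 1), new_string ++ ["E"])
    else if counter.getD "e" 0 = 1 then (counter.insert "e" (counter.getD "e" 0 + 1), new_string ++ ["3"])
    else st
  else if c = 'i' then
    if counter.getD "i" 0 = 0 then (counter.insert "i" (counter.getD "i" 0 + 1), new_string ++ ["i"])
    else if counter.getD "i" 0 = 1 then (counter.insert "i" (counter.getD "i" 0 + 1), new_string ++ ["!"])
    else (counter.insert "i" (counter.getD "i" 0 + 1), new_string ++ ["i"])
  else if c = 'I' then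
    if counter.getD "i" 0 ≠ 1 then (counter.insert "i" (counter.getD "i" 0 + 1), new_string ++ ["I"])
    else if counter.getD "i" 0 = 1 then (counter.insert "i" (counter.getD "i" 0 + 1), new_string ++ ["!"])
    else st
  else if c = 'o' then
    if counter.getD "o" 0 = 0 then (counter.insert "o" (counter.getD "o" 0 + 1), new_string ++ ["o"])
    else if counter.getD "o" 0 = 1 then (counter.insert "o" (counter.getD "o" 0 + 1), new_string ++ ["ooo"])
    else (counter.insert "o" (counter.getD "o" 0 + 1), new_string ++ ["o"])
  else if c = 'O' then
    if counter.getD "o" 0 ≠ 1 then (counter.insert "o" (counter.getD "o" 0 + 1), new_string ++ ["O"])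
    else if counter.getD "o" 0 = 1 then (counter.insert "o" (counter.getD "o" 0 + 1), new_string ++ ["000"])
    else st
  else if c = 'u' then
    if counter.getD "u" 0 = 0 then (counter.insert "u" (counter.getD "u" 0 + 1), new_string ++ ["u"])
    else if counter.getD "u" 0 = 1 then (counter.insert "u" (counter.getD "u" 0 + 1), new_string ++ ["|_|"])
    else (counter.insert "u" (counter.getD "u" 0 + 1), new_string ++ ["u"])
  else if c = 'U' then
    if counter.getD "u" 0 ≠ 1 then (counter.insert "u" (counter.getD "u" 0 + 1), new_string ++ ["U"])
    else if counter.getD "u" 0 = 1 then (counter.insert "u" (counter.getD "u" 0 + 1), new_string ++ ["|_|"])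
    else st
  else (counter, new_string ++ [String.singleton c])

def vowel_swapper (string : String) : String :=
  let counter0 : PySem.Dict String Int :=
    PySem.Dict.ofList [("a",0),("e",0),("i",0),("o",0),("u",0)]
  let r := (PySem.List.pyRange 0 (PySem.Str.len string) 1).foldl
      (fun st i => stepA (PySem.List.pyGetD string.toList i ' ') st) (counter0, ([] : List String))
  "\"" ++ PySem.Str.join "" r.2 ++ "\""

-- ===== PORT B =====
def canonB : PySem.Dict Char String := PySem.Dict.ofList
  [('a',"a"),('A',"a"),('e',"e"),('E',"e"),('i',"i"),('I',"i"),('o',"o"),('O',"o"),('u',"u"),('U',"u")]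

def leetB : PySem.Dict Char String := PySem.Dict.ofList
  [('a',"4"),('A',"4"),('e',"3"),('E',"3"),('i',"!"),('I',"!"),('o',"ooo"),('O',"000"),('u',"|_|"),('U',"|_|")]

-- pass 1 body: count canonical vowels, record the second occurrence's index → leet string
-- (LEET[ch] is ported as getD: the key is present whenever CANON contains ch, so Python never raises)
def stepB (st : PySem.Dict String Int × PySem.Dict Int String) (p : Int × Char) :
    PySem.Dict String Int × PySem.Dict Int String :=
  match canonB.get? p.2 with
  | none => st
  | some k =>
    let counts := st.1.insert k (st.1.getD k 0 + 1)
    if counts.getD k 0 = 2 then (counts, st.2.insert p.1 (leetB.getD p.2 "")) else (counts, st.2)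

def vowel_swapper_alt (string : String) : String :=
  let pairs := PySem.List.enumerate string.toList 0
  let st := pairs.foldl stepB (PySem.Dict.empty, PySem.Dict.empty)
  "\"" ++ PySem.Str.join "" (pairs.map (fun p => ((st.2.get? p.1).getD (String.singleton p.2)))) ++ "\""

-- ===== PRECONDITION & SPEC =====
def Spec_vowel_swapper (string : String) (out : String) : Prop := out = vowel_swapper_alt string
instance (string : String) (out : String) : Decidable (Spec_vowel_swapper string out) := by unfold Spec_vowel_swapper; infer_instance

-- ===== CLAIM (what is proved, stated in full; the proofs are below) =====
def Claim_equal_vowel_swapper : Prop := ∀ (string : String), Dom_vowel_swapper string → Spec_vowel_swapper string (vowel_swapper string)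

-- ===== LEMMAS AND PROOFS =====

-- what both loops emit for one character, given the counts-so-far function f
def emitC (f : String → Int) (c : Char) : String :=
  match canonB.get? c with
  | none => String.singleton c
  | some k => if f k = 1 then leetB.getD c "" else String.singleton c

-- how one character updates the counts-so-far function
def updC (f : String → Int) (c : Char) : String → Int :=
  match canonB.get? c with
  | none => f
  | some k => fun k' => if k' = k then f k + 1 else f k'

-- the list of pieces both programs produce, as a function of the char list and counts
def piecesC (cs : List Char) (f : String → Int) : List String :=
  match cs with
  | [] => []
  | c :: t => emitC f c :: piecesC t (updC f c)

lemma piecesC_congr (cs : List Char) : ∀ (f g : String → Int), (∀ k, f k = g k) →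
    piecesC cs f = piecesC cs g := by
  induction cs with
  | nil => intro f g h; rfl
  | cons c t ih =>
    intro f g h
    have he : emitC f c = emitC g c := by
      unfold emitC; cases canonB.get? c with
      | none => rfl
      | some k => simp only [h k]
    have hu : ∀ k, updC f c k = updC g c k := by
      intro k; unfold updC; cases canonB.get? c with
      | none => exact h k
      | some k0 => by_cases hk : k = k0 <;> simp [hk, h]
    simp [piecesC, he, ih _ _ hu]

-- counter update as performed on the dict
def updD (c : Char) (d : PySem.Dict String Int) : PySem.Dict String Int :=
  match canonB.get? c with
  | none => d
  | some k => d.insert k (d.getD k 0 + 1)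

lemma canonB_la : canonB.get? 'a' = some "a" := rfl
lemma leetB_la : leetB.getD 'a' "" = "4" := rfl
lemma sing_la : String.singleton 'a' = "a" := rfl
lemma canonB_ua : canonB.get? 'A' = some "a" := rfl
lemma leetB_ua : leetB.getD 'A' "" = "4" := rfl
lemma sing_ua : String.singleton 'A' = "A" := rfl
lemma canonB_le : canonB.get? 'e' = some "e" := rfl
lemma leetB_le : leetB.getD 'e' "" = "3" := rfl
lemma sing_le : String.singleton 'e' = "e" := rfl
lemma canonB_ue : canonB.get? 'E' = some "e" := rfl
lemma leetB_ue : leetB.getD 'E' "" = "3" := rfl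
lemma sing_ue : String.singleton 'E' = "E" := rfl
lemma canonB_li : canonB.get? 'i' = some "i" := rfl
lemma leetB_li : leetB.getD 'i' "" = "!" := rfl
lemma sing_li : String.singleton 'i' = "i" := rfl
lemma canonB_ui : canonB.get? 'I' = some "i" := rfl
lemma leetB_ui : leetB.getD 'I' "" = "!" := rfl
lemma sing_ui : String.singleton 'I' = "I" := rfl
lemma canonB_lo : canonB.get? 'o' = some "o" := rfl
lemma leetB_lo : leetB.getD 'o' "" = "ooo" := rfl
lemma sing_lo : String.singleton 'o' = "o" := rfl
lemma canonB_uo : canonB.get? 'O' = some "o" := rfl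
lemma leetB_uo : leetB.getD 'O' "" = "000" := rfl
lemma sing_uo : String.singleton 'O' = "O" := rfl
lemma canonB_lu : canonB.get? 'u' = some "u" := rfl
lemma leetB_lu : leetB.getD 'u' "" = "|_|" := rfl
lemma sing_lu : String.singleton 'u' = "u" := rfl
lemma canonB_uu : canonB.get? 'U' = some "u" := rfl
lemma leetB_uu : leetB.getD 'U' "" = "|_|" := rfl
lemma sing_uu : String.singleton 'U' = "U" := rfl

lemma canonB_none (c : Char) (h1 : c ≠ 'a') (h2 : c ≠ 'A') (h3 : c ≠ 'e') (h4 : c ≠ 'E')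
    (h5 : c ≠ 'i') (h6 : c ≠ 'I') (h7 : c ≠ 'o') (h8 : c ≠ 'O') (h9 : c ≠ 'u') (h0 : c ≠ 'U') :
    canonB.get? c = none := by
  have h : canonB = PySem.Dict.mk
      [('a',"a"),('A',"a"),('e',"e"),('E',"e"),('i',"i"),('I',"i"),('o',"o"),('O',"o"),('u',"u"),('U',"u")] := rfl
  rw [h]
  simp [PySem.Dict.get?_mk_cons, beq_iff_eq, Ne.symm h1, Ne.symm h2, Ne.symm h3, Ne.symm h4,
    Ne.symm h5, Ne.symm h6, Ne.symm h7, Ne.symm h8, Ne.symm h9, Ne.symm h0]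
  rfl

lemma stepA_eq (c : Char) (d : PySem.Dict String Int) (acc : List String) :
    stepA c (d, acc) = (updD c d, acc ++ [emitC (fun k => d.getD k 0) c]) := by
  by_cases h1 : c = 'a'
  · subst h1; simp [stepA, updD, emitC, canonB_la, leetB_la, sing_la]; split_ifs <;> simp_all
  by_cases h2 : c = 'A'
  · subst h2; simp [stepA, updD, emitC, canonB_ua, leetB_ua, sing_ua]; split_ifs <;> simp_all
  by_cases h3 : c = 'e'
  · subst h3; simp [stepA, updD, emitC, canonB_le, leetB_le, sing_le]; split_ifs <;> simp_all
  by_cases h4 : c = 'E'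
  · subst h4; simp [stepA, updD, emitC, canonB_ue, leetB_ue, sing_ue]; split_ifs <;> simp_all
  by_cases h5 : c = 'i'
  · subst h5; simp [stepA, updD, emitC, canonB_li, leetB_li, sing_li]; split_ifs <;> simp_all
  by_cases h6 : c = 'I'
  · subst h6; simp [stepA, updD, emitC, canonB_ui, leetB_ui, sing_ui]; split_ifs <;> simp_all
  by_cases h7 : c = 'o'
  · subst h7; simp [stepA, updD, emitC, canonB_lo, leetB_lo, sing_lo]; split_ifs <;> simp_all
  by_cases h8 : c = 'O'
  · subst h8; simp [stepA, updD, emitC, canonB_uo, leetB_uo, sing_uo]; split_ifs <;> simp_all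
  by_cases h9 : c = 'u'
  · subst h9; simp [stepA, updD, emitC, canonB_lu, leetB_lu, sing_lu]; split_ifs <;> simp_all
  by_cases h10 : c = 'U'
  · subst h10; simp [stepA, updD, emitC, canonB_uu, leetB_uu, sing_uu]; split_ifs <;> simp_all
  have hc := canonB_none c h1 h2 h3 h4 h5 h6 h7 h8 h9 h10
  simp [stepA, updD, emitC, h1, h2, h3, h4, h5, h6, h7, h8, h9, h10, hc]

lemma getD_updD (c : Char) (d : PySem.Dict String Int) (k : String) :
    (updD c d).getD k 0 = updC (fun k' => d.getD k' 0) c k := by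
  unfold updD updC
  cases canonB.get? c with
  | none => rfl
  | some k0 => rw [PySem.Dict.getD_insert]

lemma foldA (cs : List Char) : ∀ (d : PySem.Dict String Int) (acc : List String),
    cs.foldl (fun st c => stepA c st) (d, acc)
      = (cs.foldl (fun d c => updD c d) d, acc ++ piecesC cs (fun k => d.getD k 0)) := by
  induction cs with
  | nil => intro d acc; simp [piecesC]
  | cons c t ih =>
    intro d acc
    simp only [List.foldl_cons, stepA_eq, piecesC, ih]
    rw [piecesC_congr t _ _ (getD_updD c d)]
    simp

lemma get?_stepB_lt (st : PySem.Dict String Int × PySem.Dict Int String) (p : Int × Char)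
    (i : Int) (hi : i ≠ p.1) : ((stepB st p).2).get? i = st.2.get? i := by
  unfold stepB
  cases canonB.get? p.2 with
  | none => rfl
  | some k =>
    simp only []
    split_ifs <;> simp [PySem.Dict.get?_insert_of_ne _ _ hi]

lemma get?_foldB_lt (cs : List Char) : ∀ (n : Int) (st : PySem.Dict String Int × PySem.Dict Int String)
    (i : Int), i < n → (((PySem.List.enumerate cs n).foldl stepB st).2).get? i = st.2.get? i := by
  induction cs with
  | nil => intro n st i _; rfl
  | cons c t ih =>
    intro n st i hi
    rw [PySem.List.enumerate_cons, List.foldl_cons, ih (n+1) _ i (by omega)]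
    exact get?_stepB_lt st (n, c) i (by simp; omega)

lemma foldB_render (cs : List Char) : ∀ (n : Int) (counts : PySem.Dict String Int)
    (r : PySem.Dict Int String), (∀ i : Int, n ≤ i → r.get? i = none) →
    (PySem.List.enumerate cs n).map
        (fun p => ((((PySem.List.enumerate cs n).foldl stepB (counts, r)).2).get? p.1).getD (String.singleton p.2))
      = piecesC cs (fun k => counts.getD k 0) := by
  induction cs with
  | nil => intro n counts r _; rfl
  | cons c t ih =>
    intro n counts r hr
    rw [PySem.List.enumerate_cons]
    simp only [List.map_cons, List.foldl_cons, piecesC]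
    have hhead : (((PySem.List.enumerate t (n+1)).foldl stepB (stepB (counts, r) (n, c))).2).get? n
        = ((stepB (counts, r) (n, c)).2).get? n := get?_foldB_lt t (n+1) _ n (by omega)
    cases hc : canonB.get? c with
    | none =>
      have hst : stepB (counts, r) (n, c) = (counts, r) := by simp [stepB, hc]
      rw [hst] at hhead ⊢
      rw [hhead, hr n le_rfl]
      have htail := ih (n+1) counts r (fun i hi => hr i (by omega))
      rw [htail]
      simp [emitC, updC, hc]
    | some k =>
      by_cases hk : counts.getD k 0 = 1
      · have hst : stepB (counts, r) (n, c)
            = (counts.insert k (counts.getD k 0 + 1), r.insert n (leetB.getD c "")) := by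
          simp [stepB, hc, PySem.Dict.getD_insert_self, hk]
        rw [hst] at hhead ⊢
        rw [hhead, PySem.Dict.get?_insert_self]
        have htail := ih (n+1) (counts.insert k (counts.getD k 0 + 1)) (r.insert n (leetB.getD c ""))
          (fun i hi => by rw [PySem.Dict.get?_insert_of_ne _ _ (by omega : i ≠ n)]; exact hr i (by omega))
        rw [htail, piecesC_congr t _ _ (fun k' => by
          simpa [updD, hc] using getD_updD c counts k')]
        simp [emitC, hc, hk]
      · have hst : stepB (counts, r) (n, c)
            = (counts.insert k (counts.getD k 0 + 1), r) := by
          simp [stepB, hc, PySem.Dict.getD_insert_self]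
          intro h; omega
        rw [hst] at hhead ⊢
        rw [hhead, hr n le_rfl]
        have htail := ih (n+1) (counts.insert k (counts.getD k 0 + 1)) r (fun i hi => hr i (by omega))
        rw [htail, piecesC_congr t _ _ (fun k' => by
          simpa [updD, hc] using getD_updD c counts k')]
        simp [emitC, hc, hk]

lemma counter0_getD (k : String) :
    (PySem.Dict.ofList [("a",(0:Int)),("e",0),("i",0),("o",0),("u",0)]).getD k 0 = 0 := by
  have h : (PySem.Dict.ofList [("a",(0:Int)),("e",0),("i",0),("o",0),("u",0)])
      = PySem.Dict.mk [("a",(0:Int)),("e",0),("i",0),("o",0),("u",0)] := rfl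
  rw [h, PySem.Dict.getD_eq_get?_getD]
  simp only [PySem.Dict.get?_mk_cons]
  split_ifs <;> rfl

-- ===== VERDICT (by name: the statement is the Claim_ definition above) =====
theorem vowel_swapper_spec : Claim_equal_vowel_swapper := by
  intro string _
  unfold Spec_vowel_swapper vowel_swapper vowel_swapper_alt
  simp only []
  have hA : (PySem.List.pyRange 0 (PySem.Str.len string) 1).foldl
      (fun st i => stepA (PySem.List.pyGetD string.toList i ' ') st)
      (PySem.Dict.ofList [("a",(0:Int)),("e",0),("i",0),("o",0),("u",0)], ([] : List String))
      = string.toList.foldl (fun st c => stepA c st)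
        (PySem.Dict.ofList [("a",(0:Int)),("e",0),("i",0),("o",0),("u",0)], ([] : List String)) := by
    have := PySem.List.foldl_pyRange_zero_pyGetD' string.toList ' '
      (fun st c => stepA c st)
      (PySem.Dict.ofList [("a",(0:Int)),("e",0),("i",0),("o",0),("u",0)], ([] : List String))
    simpa using this
  rw [hA, foldA]
  rw [foldB_render string.toList 0 PySem.Dict.empty PySem.Dict.empty
    (fun i _ => PySem.Dict.get?_empty i)]
  rw [piecesC_congr string.toList
    (fun k => (PySem.Dict.ofList [("a",(0:Int)),("e",0),("i",0),("o",0),("u",0)]).getD k 0)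
    (fun k => PySem.Dict.empty.getD k 0)
    (fun k => by simp only [counter0_getD, PySem.Dict.getD_empty])]
  rfl
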